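-- pv_equiv track=rewrite | github.com/levindoneto/lanGen | utils/LangModels.py | getNGramOccurances
-- ===== SOURCE A (Python) =====
-- def addOccurance(currentWord, nextWord, occurances):
--     occurs = occurances
--     if (currentWord in occurs):
--         if (nextWord in occurs[currentWord]):
--             aux = int(occurs[currentWord][nextWord])
--             aux += 1
--             occurs[currentWord][nextWord] = str(aux)
--         else:
--             occurs[currentWord].update({nextWord : "1"})
--     else:
--         occurs[currentWord] = {nextWord : "1"}
--     return occurs
--
-- def getNGramOccurances(ngrams):
--     occurs = {}
--     currentWord = 0
--     nextWord = 1
--     for i in range(len(ngrams) - 1):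
--         occurs = addOccurance(ngrams[currentWord], ngrams[nextWord], occurs)
--         currentWord += 1
--         nextWord += 1
--     return occurs
-- ===== SOURCE B (Python) =====
-- def getNGramOccurances(ngrams):
--     # Phase 1: one pass over the consecutive pairs, counting each pair in a
--     # flat tuple-keyed dict (string counters, as the result values are strings).
--     flat = {}
--     for pair in zip(ngrams, ngrams[1:]):
--         if pair in flat:
--             flat[pair] = str(int(flat[pair]) + 1)
--         else:
--             flat[pair] = "1"
--     # Phase 2: group the flat counts into the nested dict; pair insertion order
--     # makes outer and inner key order the first-appearance order.
--     occurs = {}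
--     for (cur, nxt), cnt in flat.items():
--         if cur in occurs:
--             occurs[cur][nxt] = cnt
--         else:
--             occurs[cur] = {nxt: cnt}
--     return occurs
-- ===== Notes on version B (the rewrite author's own statement) =====
-- stated objective: alternative
-- what changed: A updates a nested dict-of-dicts in place for each consecutive pair via a helper that re-parses the stored count string; B first counts pairs from zip(ngrams, ngrams[1:]) in a flat tuple-keyed dict and then groups the flat counts into the nested dict in a second pass.
import Mathlib
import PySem

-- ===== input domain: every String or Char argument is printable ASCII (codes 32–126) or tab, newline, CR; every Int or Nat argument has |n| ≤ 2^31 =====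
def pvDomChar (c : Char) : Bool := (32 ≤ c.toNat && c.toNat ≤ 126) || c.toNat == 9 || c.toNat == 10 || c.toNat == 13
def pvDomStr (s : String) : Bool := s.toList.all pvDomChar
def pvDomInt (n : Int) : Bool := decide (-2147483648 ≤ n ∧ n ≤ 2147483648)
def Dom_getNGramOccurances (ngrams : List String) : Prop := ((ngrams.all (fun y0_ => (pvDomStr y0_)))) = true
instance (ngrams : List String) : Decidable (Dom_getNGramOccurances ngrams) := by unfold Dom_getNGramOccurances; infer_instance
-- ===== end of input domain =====

-- B replaces A's per-step nested-dict update by a flat pair-keyed counting pass followed by a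
-- grouping pass (objective: alternative decomposition, same cost).

-- ===== PORT A =====
def pvAddOccurance (currentWord nextWord : String)
    (occurances : PySem.Dict String (PySem.Dict String String)) :
    PySem.Dict String (PySem.Dict String String) :=
  if occurances.contains currentWord then
    -- occurs[currentWord]: exact, the key is present on this branch
    let inner := (occurances.get? currentWord).getD PySem.Dict.empty
    if inner.contains nextWord then
      -- int(occurs[currentWord][nextWord]): exact here, the stored strings are all str(n)
      let aux := (PySem.Int.ofStr? ((inner.get? nextWord).getD "")).getD 0
      occurances.insert currentWord (inner.insert nextWord (PySem.Int.toStr (aux + 1)))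
    else
      occurances.insert currentWord (inner.insert nextWord "1")
  else
    occurances.insert currentWord (PySem.Dict.ofList [(nextWord, "1")])

def getNGramOccurances (ngrams : List String) : List (String × List (String × String)) :=
  let occurs := (PySem.List.pyRange 0 (PySem.List.len ngrams - 1) 1).foldl
    (fun occ i =>
      -- ngrams[i] / ngrams[i+1]: exact, i and i+1 are in range for every i the loop visits
      pvAddOccurance (PySem.List.pyGetD ngrams i "") (PySem.List.pyGetD ngrams (i + 1) "") occ)
    PySem.Dict.empty
  occurs.items.map (fun p => (p.1, p.2.items))

-- ===== PORT B =====
def getNGramOccurances_alt (ngrams : List String) : List (String × List (String × String)) :=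
  let flat := (ngrams.zip (PySem.List.slice ngrams (some 1) none)).foldl
    (fun flat pair =>
      if flat.contains pair then
        -- int(flat[pair]): exact here, the stored strings are all str(n)
        flat.insert pair (PySem.Int.toStr ((PySem.Int.ofStr? ((flat.get? pair).getD "")).getD 0 + 1))
      else
        flat.insert pair "1")
    PySem.Dict.empty
  let occurs := flat.items.foldl
    (fun occ q =>
      if occ.contains q.1.1 then
        occ.insert q.1.1 (((occ.get? q.1.1).getD PySem.Dict.empty).insert q.1.2 q.2)
      else
        occ.insert q.1.1 (PySem.Dict.ofList [(q.1.2, q.2)]))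
    PySem.Dict.empty
  occurs.items.map (fun p => (p.1, p.2.items))

-- ===== PRECONDITION & SPEC =====
def Spec_getNGramOccurances (ngrams : List String) (out : List (String × List (String × String))) : Prop := out = getNGramOccurances_alt ngrams
instance (ngrams : List String) (out : List (String × List (String × String))) : Decidable (Spec_getNGramOccurances ngrams out) := by unfold Spec_getNGramOccurances; infer_instance

-- ===== CLAIM (what is proved, stated in full; the proofs are below) =====
def Claim_equal_getNGramOccurances : Prop := ∀ (ngrams : List String), Dom_getNGramOccurances ngrams → Spec_getNGramOccurances ngrams (getNGramOccurances ngrams)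

-- ===== LEMMAS AND PROOFS =====

theorem pv_get?_mk_map {κ ν : Type} [BEq κ] [LawfulBEq κ] (S : List κ) (g : κ → ν) (c : κ) :
    (PySem.Dict.mk (S.map (fun k => (k, g k)))).get? c = if c ∈ S then some (g c) else none := by
  induction S with
  | nil => simp [PySem.Dict.get?]
  | cons a S ih =>
      rw [List.map_cons, PySem.Dict.get?_mk_cons, ih]
      by_cases h : a = c
      · subst h; simp
      · simp [h, beq_iff_eq, Ne.symm h]

theorem pv_contains_mk_map {κ ν : Type} [BEq κ] [LawfulBEq κ] (S : List κ) (g : κ → ν) (c : κ) :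
    (PySem.Dict.mk (S.map (fun k => (k, g k)))).contains c = decide (c ∈ S) := by
  simp only [PySem.Dict.contains, List.any_map, Function.comp_def]
  rw [List.any_beq']
  simp

theorem pv_insert_mk_map {κ ν : Type} [BEq κ] [LawfulBEq κ] [DecidableEq κ] (S : List κ) (g : κ → ν) (c : κ) (v : ν) :
    (PySem.Dict.mk (S.map (fun k => (k, g k)))).insert c v
      = PySem.Dict.mk ((PySem.Set.add S c).map (fun k => (k, if k = c then v else g k))) := by
  rw [PySem.Set.add_eq_ite]
  by_cases h : c ∈ S
  · simp only [PySem.Dict.insert, pv_contains_mk_map, h, decide_true, if_true, List.map_map]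
    congr 1
    apply List.map_congr_left
    intro k _
    by_cases hk : k = c
    · subst hk; simp
    · simp [hk, beq_iff_eq]
  · simp only [PySem.Dict.insert, pv_contains_mk_map, h, decide_false, if_false, Bool.false_eq_true,
      List.map_append, List.map_cons, List.map_nil]
    congr 1
    congr 1
    · apply List.map_congr_left
      intro k hk
      have : k ≠ c := fun e => h (e ▸ hk)
      simp [this]

theorem pv_ofList_singleton {κ ν : Type} [BEq κ] (k : κ) (v : ν) :
    PySem.Dict.ofList [(k, v)] = PySem.Dict.mk [(k, v)] := by
  simp [PySem.Dict.ofList, PySem.Dict.update, PySem.Dict.insert, PySem.Dict.contains, PySem.Dict.empty]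

def pvWs (l : List (String × String)) (c : String) : List String :=
  ((PySem.Set.ofList l).filter (fun p => p.1 == c)).map (·.2)

theorem pv_mem_pvWs (l : List (String × String)) (c : String) (w : String) :
    w ∈ pvWs l c ↔ (c, w) ∈ l := by
  unfold pvWs
  simp only [List.mem_map, List.mem_filter, beq_iff_eq, PySem.Set.mem_ofList]
  constructor
  · rintro ⟨p, ⟨hp, h1⟩, h2⟩
    have : p = (c, w) := by cases p; simp_all
    exact this ▸ hp
  · intro h
    exact ⟨(c, w), ⟨h, rfl⟩, rfl⟩

theorem pv_ofList_map_ofList {α β : Type} [BEq α] [LawfulBEq α] [BEq β] [LawfulBEq β] (l : List α) (f : α → β) :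
    PySem.Set.ofList ((PySem.Set.ofList l).map f) = PySem.Set.ofList (l.map f) := by
  induction l using List.reverseRecOn with
  | nil => simp
  | append_singleton l x ih =>
      rw [PySem.Set.ofList_append_singleton, PySem.Set.add_eq_ite, List.map_append]
      simp only [List.map_cons, List.map_nil]
      by_cases h : x ∈ PySem.Set.ofList l
      · have hx : f x ∈ l.map f := List.mem_map_of_mem (by simpa [PySem.Set.mem_ofList] using h)
        rw [if_pos h, PySem.Set.ofList_append_singleton, PySem.Set.add_eq_ite, if_pos, ih]
        simpa [PySem.Set.mem_ofList] using hx
      · rw [if_neg h, List.map_append]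
        simp only [List.map_cons, List.map_nil]
        rw [PySem.Set.ofList_append_singleton, PySem.Set.ofList_append_singleton, ih]

theorem pv_pairs_map (xs : List String) :
    (List.range (xs.length - 1)).map (fun k => (xs.getD k "", xs.getD (k + 1) "")) = xs.zip xs.tail := by
  apply List.ext_getElem
  · simp [List.length_zip, List.length_tail]
  · intro k h1 h2
    simp only [List.getElem_map, List.getElem_range, List.getElem_zip]
    have hlen : k < xs.length - 1 := by simpa using h1
    have hk : k < xs.length := by omega
    have hk1 : k + 1 < xs.length := by omega
    rw [List.getD_eq_getElem xs "" hk, List.getD_eq_getElem xs "" hk1]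
    congr 1
    rw [List.getElem_tail]

theorem pv_index_fold {σ : Type} (xs : List String) (F : σ → String → String → σ) (init : σ) :
    (PySem.List.pyRange 0 (PySem.List.len xs - 1) 1).foldl
      (fun s i => F s (PySem.List.pyGetD xs i "") (PySem.List.pyGetD xs (i + 1) "")) init
    = (xs.zip xs.tail).foldl (fun s p => F s p.1 p.2) init := by
  rw [PySem.List.pyRange_one, List.foldl_map]
  have hn : ((PySem.List.len xs - 1) - 0).toNat = xs.length - 1 := by
    simp [PySem.List.len_eq]
  rw [hn, ← pv_pairs_map xs, List.foldl_map]
  apply PySem.List.foldl_congr_mem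
  intro s k hk
  have hlen : k < xs.length - 1 := List.mem_range.mp hk
  have h1 : (0 : Int) + (k : Int) = ((k : Nat) : Int) := by omega
  have h2 : (k : Int) + 1 = (((k + 1 : Nat)) : Int) := by push_cast; ring
  rw [h1, h2, PySem.List.pyGetD_natCast, PySem.List.pyGetD_natCast]

def pvStrIter : Nat → String
  | 0 => "0"
  | n + 1 => PySem.Int.toStr ((PySem.Int.ofStr? (pvStrIter n)).getD 0 + 1)

def pvCanonF (l : List (String × String)) : PySem.Dict (String × String) String :=
  PySem.Dict.mk ((PySem.Set.ofList l).map (fun p => (p, pvStrIter (l.count p))))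

theorem pv_strIter_one : pvStrIter 1 = "1" := by decide

theorem pv_count_append_self (l : List (String × String)) (p : String × String) :
    (l ++ [p]).count p = l.count p + 1 := by
  rw [List.count_append, List.count_singleton]; simp

theorem pv_count_append_ne {α : Type} [BEq α] [LawfulBEq α] (l : List α) (p k : α) (h : k ≠ p) :
    (l ++ [p]).count k = l.count k := by
  rw [List.count_append, List.count_singleton]; simp [Ne.symm h]

theorem pv_foldF_canon (l : List (String × String)) :
    l.foldl
      (fun flat pair =>
        if flat.contains pair then
          flat.insert pair (PySem.Int.toStr ((PySem.Int.ofStr? ((flat.get? pair).getD "")).getD 0 + 1))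
        else
          flat.insert pair "1")
      PySem.Dict.empty = pvCanonF l := by
  induction l using List.reverseRecOn with
  | nil => simp [pvCanonF, PySem.Dict.empty]
  | append_singleton l p ih =>
      rw [List.foldl_append, List.foldl_cons, List.foldl_nil, ih]
      unfold pvCanonF
      rw [pv_contains_mk_map]
      by_cases h : p ∈ l
      · have hmem : p ∈ PySem.Set.ofList l := (PySem.Set.mem_ofList _ _).mpr h
        rw [if_pos (by simpa using hmem), pv_get?_mk_map, if_pos hmem]
        rw [pv_insert_mk_map]
        rw [PySem.Set.ofList_append_singleton, PySem.Set.add_of_mem hmem]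
        congr 1
        apply List.map_congr_left
        intro k hk
        by_cases hkp : k = p
        · subst hkp
          simp [pvStrIter]
        · simp [hkp, pv_count_append_ne l p k hkp]
      · have hmem : p ∉ PySem.Set.ofList l := fun hc => h ((PySem.Set.mem_ofList _ _).mp hc)
        rw [if_neg (by simpa using hmem), pv_insert_mk_map]
        rw [PySem.Set.ofList_append_singleton, PySem.Set.add_of_not_mem hmem]
        congr 1
        apply List.map_congr_left
        intro k hk
        rcases List.mem_append.mp hk with hk' | hk'
        · have hkp : k ≠ p := fun e => hmem (e ▸ hk')
          simp [hkp, pv_count_append_ne l p k hkp]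
        · have hkp : k = p := by simpa using hk'
          subst hkp
          have h0 : l.count k = 0 := List.count_eq_zero.mpr h
          simp [h0, pv_strIter_one]

theorem pv_pvWs_append (l : List (String × String)) (p : String × String) (c : String) :
    pvWs (l ++ [p]) c
      = if p ∈ l then pvWs l c
        else if p.1 = c then pvWs l c ++ [p.2] else pvWs l c := by
  unfold pvWs
  rw [PySem.Set.ofList_append_singleton, PySem.Set.add_eq_ite]
  by_cases h : p ∈ PySem.Set.ofList l
  · simp [(PySem.Set.mem_ofList _ _).mp h]
  · have h' : p ∉ l := fun hm => h ((PySem.Set.mem_ofList _ _).mpr hm)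
    rw [if_neg h, if_neg h', List.filter_append, List.map_append]
    by_cases hc : p.1 = c
    · simp [hc]
    · simp [hc]

theorem pv_pvWs_nil_of_not_mem (l : List (String × String)) (c : String)
    (h : c ∉ l.map (·.1)) : pvWs l c = [] := by
  unfold pvWs
  rw [List.map_eq_nil_iff, List.filter_eq_nil_iff]
  intro p hp
  simp only [beq_iff_eq]
  intro e
  exact h (e ▸ List.mem_map_of_mem (f := fun x => x.1) ((PySem.Set.mem_ofList _ _).mp hp))

def pvCanonO (l : List (String × String)) : PySem.Dict String (PySem.Dict String String) :=
  PySem.Dict.mk ((PySem.Set.ofList (l.map (·.1))).map (fun c =>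
    (c, PySem.Dict.mk ((pvWs l c).map (fun w => (w, pvStrIter (l.count (c, w))))))))

theorem pvAddOccurance_eq (c w : String) (occ : PySem.Dict String (PySem.Dict String String)) :
    pvAddOccurance c w occ =
      if occ.contains c then
        (if ((occ.get? c).getD PySem.Dict.empty).contains w then
          occ.insert c (((occ.get? c).getD PySem.Dict.empty).insert w
            (PySem.Int.toStr (((PySem.Int.ofStr? ((((occ.get? c).getD PySem.Dict.empty).get? w).getD "")).getD 0) + 1)))
        else
          occ.insert c (((occ.get? c).getD PySem.Dict.empty).insert w "1"))
      else occ.insert c (PySem.Dict.ofList [(w, "1")]) := rfl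

theorem pv_foldA_canon (l : List (String × String)) :
    l.foldl (fun occ p => pvAddOccurance p.1 p.2 occ) PySem.Dict.empty = pvCanonO l := by
  induction l using List.reverseRecOn with
  | nil => simp [pvCanonO, pvWs, PySem.Dict.empty]
  | append_singleton l p ih =>
      obtain ⟨c, w⟩ := p
      rw [List.foldl_append, List.foldl_cons, List.foldl_nil, ih]
      show pvAddOccurance c w (pvCanonO l) = pvCanonO (l ++ [(c, w)])
      rw [pvAddOccurance_eq]
      unfold pvCanonO
      rw [pv_contains_mk_map]
      by_cases hc : c ∈ l.map (·.1)
      · have hcS : c ∈ PySem.Set.ofList (l.map (·.1)) := (PySem.Set.mem_ofList _ _).mpr hc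
        rw [if_pos (by simpa using hcS), pv_get?_mk_map, if_pos hcS, Option.getD_some,
          pv_contains_mk_map]
        by_cases hw : (c, w) ∈ l
        · have hwW : w ∈ pvWs l c := (pv_mem_pvWs l c w).mpr hw
          rw [if_pos (by simpa using hwW), pv_get?_mk_map, if_pos hwW, Option.getD_some,
            pv_insert_mk_map, pv_insert_mk_map, PySem.Set.add_of_mem hwW,
            PySem.Set.add_of_mem hcS, List.map_append, List.map_cons, List.map_nil, PySem.Set.ofList_append_singleton,
            PySem.Set.add_of_mem (by simpa using hcS)]
          congr 1
          apply List.map_congr_left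
          intro c' hc'
          by_cases hcc : c' = c
          · subst hcc
            rw [if_pos rfl]
            have hW : pvWs (l ++ [(c', w)]) c' = pvWs l c' := by
              rw [pv_pvWs_append, if_pos hw]
            rw [hW]
            congr 1
            congr 1
            apply List.map_congr_left
            intro w' hw'
            by_cases hww : w' = w
            · subst hww
              rw [if_pos rfl, pv_count_append_self]
              simp [pvStrIter]
            · rw [if_neg hww, pv_count_append_ne l (c', w) (c', w') (by simp [hww])]
          · rw [if_neg hcc]
            have hW : pvWs (l ++ [(c, w)]) c' = pvWs l c' := by
              rw [pv_pvWs_append, if_pos hw]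
            rw [hW]
            congr 2
            apply List.map_congr_left
            intro w' _
            rw [pv_count_append_ne l (c, w) (c', w') (by simp [hcc])]
        · have hwW : w ∉ pvWs l c := fun hm => hw ((pv_mem_pvWs l c w).mp hm)
          have hpl : (c, w) ∉ l := hw
          rw [if_neg (by simpa using hwW),
            pv_insert_mk_map, pv_insert_mk_map, PySem.Set.add_of_not_mem hwW,
            PySem.Set.add_of_mem hcS]
          simp only [List.map_append, List.map_cons, List.map_nil]
          rw [PySem.Set.ofList_append_singleton, PySem.Set.add_of_mem (by simpa using hcS)]
          congr 1
          apply List.map_congr_left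
          intro c' hc'
          by_cases hcc : c' = c
          · subst hcc
            rw [if_pos rfl]
            have hW : pvWs (l ++ [(c', w)]) c' = pvWs l c' ++ [w] := by
              rw [pv_pvWs_append, if_neg hpl, if_pos rfl]
            rw [hW, List.map_append, List.map_cons, List.map_nil]
            congr 1
            congr 1
            congr 1
            · apply List.map_congr_left
              intro w' hw'
              have hww : w' ≠ w := fun e => hwW (e ▸ hw')
              rw [if_neg hww, pv_count_append_ne l (c', w) (c', w') (by simp [hww])]
            · have h0 : l.count (c', w) = 0 := List.count_eq_zero.mpr hpl
              simp [h0, pv_strIter_one]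
          · rw [if_neg hcc]
            have hW : pvWs (l ++ [(c, w)]) c' = pvWs l c' := by
              rw [pv_pvWs_append, if_neg hpl, if_neg (fun e => hcc e.symm)]
            rw [hW]
            congr 2
            apply List.map_congr_left
            intro w' _
            rw [pv_count_append_ne l (c, w) (c', w') (by simp [hcc])]
      · have hcS : c ∉ PySem.Set.ofList (l.map (·.1)) := fun hm => hc ((PySem.Set.mem_ofList _ _).mp hm)
        have hpl : (c, w) ∉ l := fun hm => hc (List.mem_map_of_mem (f := fun x => x.1) hm)
        rw [if_neg (by simpa using hcS), pv_insert_mk_map, pv_ofList_singleton,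
          PySem.Set.add_of_not_mem hcS]
        simp only [List.map_append, List.map_cons, List.map_nil]
        rw [PySem.Set.ofList_append_singleton, PySem.Set.add_of_not_mem (by simpa using hcS)]
        simp only [List.map_append, List.map_cons, List.map_nil]
        congr 1
        congr 1
        · apply List.map_congr_left
          intro c' hc'
          have hcc : c' ≠ c := fun e => hcS (e ▸ hc')
          rw [if_neg hcc]
          have hW : pvWs (l ++ [(c, w)]) c' = pvWs l c' := by
            rw [pv_pvWs_append, if_neg hpl, if_neg (fun e => hcc e.symm)]
          rw [hW]
          congr 2
          apply List.map_congr_left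
          intro w' _
          rw [pv_count_append_ne l (c, w) (c', w') (by simp [hcc])]
        · have hW : pvWs (l ++ [(c, w)]) c = pvWs l c ++ [w] := by
            rw [pv_pvWs_append, if_neg hpl, if_pos rfl]
          have h0 : pvWs l c = [] := pv_pvWs_nil_of_not_mem l c hc
          have hcnt : l.count (c, w) = 0 := List.count_eq_zero.mpr hpl
          simp [hW, h0, hcnt, pv_strIter_one]

theorem pv_group_canon (S : List (String × String)) (v : String × String → String) (hS : S.Nodup) :
    (S.map (fun p => (p, v p))).foldl
      (fun occ q =>
        if occ.contains q.1.1 then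
          occ.insert q.1.1 (((occ.get? q.1.1).getD PySem.Dict.empty).insert q.1.2 q.2)
        else
          occ.insert q.1.1 (PySem.Dict.ofList [(q.1.2, q.2)]))
      PySem.Dict.empty
    = PySem.Dict.mk ((PySem.Set.ofList (S.map (·.1))).map (fun c =>
        (c, PySem.Dict.mk (((S.filter (fun p => p.1 == c)).map (·.2)).map (fun w => (w, v (c, w))))))) := by
  induction S using List.reverseRecOn with
  | nil => simp [PySem.Dict.empty]
  | append_singleton S p ih =>
      have hS' : S.Nodup := (List.nodup_append.mp hS).1
      have hpS : p ∉ S := by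
        intro hm
        have h := hS
        rw [List.nodup_append] at h
        exact h.2.2 p hm p (by simp) rfl
      obtain ⟨c, w⟩ := p
      rw [List.map_append, List.map_cons, List.map_nil, List.foldl_append,
        List.foldl_cons, List.foldl_nil, ih hS']
      dsimp only
      rw [pv_contains_mk_map]
      by_cases hc : c ∈ S.map (·.1)
      · have hcS : c ∈ PySem.Set.ofList (S.map (·.1)) := (PySem.Set.mem_ofList _ _).mpr hc
        rw [if_pos (by simpa using hcS), pv_get?_mk_map, if_pos hcS, Option.getD_some,
          pv_insert_mk_map, pv_insert_mk_map, PySem.Set.add_of_mem hcS]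
        have hwK : w ∉ (S.filter (fun p => p.1 == c)).map (·.2) := by
          intro hm
          rcases List.mem_map.mp hm with ⟨q, hq, hq2⟩
          have hq1 : q.1 = c := by simpa using (List.mem_filter.mp hq).2
          have : q = (c, w) := by cases q; simp_all
          exact hpS (this ▸ (List.mem_filter.mp hq).1)
        rw [PySem.Set.add_of_not_mem hwK]
        simp only [List.map_append, List.map_cons, List.map_nil]
        rw [PySem.Set.ofList_append_singleton, PySem.Set.add_of_mem (by simpa using hcS)]
        congr 1
        apply List.map_congr_left
        intro c' hc'
        by_cases hcc : c' = c
        · subst hcc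
          rw [if_pos rfl]
          have hfil : (S ++ [(c', w)]).filter (fun p => p.1 == c') = S.filter (fun p => p.1 == c') ++ [(c', w)] := by
            rw [List.filter_append]; simp
          rw [hfil, List.map_append, List.map_cons, List.map_nil, List.map_append,
            List.map_cons, List.map_nil]
          congr 1
          congr 1
          congr 1
          · apply List.map_congr_left
            intro w' hw'
            have hww : w' ≠ w := fun e => hwK (e ▸ hw')
            rw [if_neg hww]
        · rw [if_neg hcc]
          have hfil : (S ++ [(c, w)]).filter (fun p => p.1 == c') = S.filter (fun p => p.1 == c') := by
            rw [List.filter_append]; simp [Ne.symm hcc]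
          rw [hfil]
      · have hcS : c ∉ PySem.Set.ofList (S.map (·.1)) := fun hm => hc ((PySem.Set.mem_ofList _ _).mp hm)
        rw [if_neg (by simpa using hcS), pv_insert_mk_map, pv_ofList_singleton,
          PySem.Set.add_of_not_mem hcS]
        simp only [List.map_append, List.map_cons, List.map_nil]
        rw [PySem.Set.ofList_append_singleton, PySem.Set.add_of_not_mem (by simpa using hcS)]
        simp only [List.map_append, List.map_cons, List.map_nil]
        congr 1
        congr 1
        · apply List.map_congr_left
          intro c' hc'
          have hcc : c' ≠ c := fun e => hcS (e ▸ hc')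
          rw [if_neg hcc]
          have hfil : (S ++ [(c, w)]).filter (fun p => p.1 == c') = S.filter (fun p => p.1 == c') := by
            rw [List.filter_append]; simp [Ne.symm hcc]
          rw [hfil]
        · have hfil : (S ++ [(c, w)]).filter (fun p => p.1 == c) = S.filter (fun p => p.1 == c) ++ [(c, w)] := by
            rw [List.filter_append]; simp
          have hnil : S.filter (fun p => p.1 == c) = [] := by
            rw [List.filter_eq_nil_iff]
            intro q hq
            simp only [beq_iff_eq]
            intro e
            exact hc (e ▸ List.mem_map_of_mem (f := fun x => x.1) hq)
          simp [hfil, hnil]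

theorem pv_ports_agree (ngrams : List String) :
    getNGramOccurances ngrams = getNGramOccurances_alt ngrams := by
  unfold getNGramOccurances getNGramOccurances_alt
  rw [PySem.List.slice_from_one,
    pv_index_fold ngrams (fun s a b => pvAddOccurance a b s) PySem.Dict.empty,
    pv_foldA_canon, pv_foldF_canon]
  dsimp only
  have hitems : (pvCanonF (ngrams.zip ngrams.tail)).items
      = (PySem.Set.ofList (ngrams.zip ngrams.tail)).map
          (fun p => (p, pvStrIter ((ngrams.zip ngrams.tail).count p))) := rfl
  rw [hitems, pv_group_canon _ _ (PySem.Set.nodup_ofList _)]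
  unfold pvCanonO pvWs
  rw [pv_ofList_map_ofList]

-- ===== VERDICT (by name: the statement is the Claim_ definition above) =====
theorem getNGramOccurances_spec : Claim_equal_getNGramOccurances := by
  intro ngrams _
  unfold Spec_getNGramOccurances
  exact pv_ports_agree ngrams
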